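-- pv_equiv track=rewrite | github.com/wang-zhen/upload | cloudsync/glusters/glfstats.py | _parse_brick_entries
-- ===== SOURCE A (Python) =====
-- def _parse_brick_entries(volume, all_entries):
--     """
--     volume vol1-cloudsync
--         type features/cloudsync
--         option cs-watermark-thread-frequency 15
--         option cs-max-mb 4000
--         option cs-max-files 1000
--         option s3plugin-https off
--         option s3plugin-hostname 192.168.2.95:9000
--         option s3plugin-bucketid glvol2
--         option s3plugin-keyid SIWSWX33WD7K8HADNYVU
--         option s3plugin-seckey u1fIgYyWlyNjJC3XjM8gH+i908EQk/OBkb9Cxjmk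
--         option cs-storetype cloudsyncs3
--         option cs-worm on
--         option cloudsync on
--         subvolumes vol1-dht
--     end-volume
--     """
--     flag = 0
--     infos = {}
--     current_volume = {}
--     xlator = "volume %s-cloudsync" % volume
--     for line in all_entries.split('\n'):
--         if line == xlator:
--             flag = 1
--             continue
--         if flag and (line == "end-volume"):
--             break;
--         if flag:
--             fields = line.strip().split(' ')
--             if fields[0] == 'option':
--                 key = fields[1]
--                 current_volume[key] = fields[2]
--
--     infos[volume] = current_volume
--
--     return infos
-- ===== SOURCE B (Python) =====
-- def _parse_brick_entries(volume, all_entries):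
--     lines = all_entries.split('\n')
--     header = "volume %s-cloudsync" % volume
--     opts = {}
--     try:
--         start = lines.index(header) + 1
--     except ValueError:
--         return {volume: opts}
--     try:
--         stop = lines.index('end-volume', start)
--     except ValueError:
--         stop = len(lines)
--     for line in lines[start:stop]:
--         fields = line.strip().split(' ')
--         if fields[0] == 'option':
--             opts[fields[1]] = fields[2]
--     return {volume: opts}
-- ===== Notes on version B (the rewrite author's own statement) =====
-- stated objective: simpler
-- what changed: Replaces the single flag-driven loop with a locate-then-parse decomposition: find the block boundaries with list.index, slice out the block, and parse only that slice with one plain loop.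
import Mathlib
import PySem

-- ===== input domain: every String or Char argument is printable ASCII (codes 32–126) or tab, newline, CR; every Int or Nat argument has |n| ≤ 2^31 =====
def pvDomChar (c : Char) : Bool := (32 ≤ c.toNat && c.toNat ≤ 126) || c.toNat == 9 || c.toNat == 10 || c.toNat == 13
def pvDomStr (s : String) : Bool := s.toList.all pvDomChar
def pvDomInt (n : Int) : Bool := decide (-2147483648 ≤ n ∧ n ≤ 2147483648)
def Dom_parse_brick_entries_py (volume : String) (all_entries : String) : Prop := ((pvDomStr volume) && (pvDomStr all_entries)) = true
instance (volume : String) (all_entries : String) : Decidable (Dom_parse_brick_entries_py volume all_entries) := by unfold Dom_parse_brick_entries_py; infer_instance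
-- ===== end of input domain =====

-- B replaces A's flag-driven single loop by locate-the-block-then-parse-the-slice (simpler decomposition, same cost).

-- ===== PORT A =====
-- shared per-line parsing step: fields = line.strip().split(' '); if fields[0]=='option': d[fields[1]] = fields[2]
-- (fields[1]/fields[2] via pyGetD; Python raises IndexError exactly on the inputs Pre_ excludes)
def pvStep (d : PySem.Dict String String) (line : String) : PySem.Dict String String :=
  let fields := (PySem.Str.split? (PySem.Str.strip line) " ").getD []
  if PySem.List.pyGetD fields 0 "" == "option" then
    d.insert (PySem.List.pyGetD fields 1 "") (PySem.List.pyGetD fields 2 "")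
  else d

-- A's loop over the lines, carrying the flag and current_volume
def pvAloop (xlator : String) : List String → Bool → PySem.Dict String String → PySem.Dict String String
  | [], _, cur => cur
  | line :: rest, flag, cur =>
    if line == xlator then pvAloop xlator rest true cur
    else if flag && (line == "end-volume") then cur
    else if flag then pvAloop xlator rest flag (pvStep cur line)
    else pvAloop xlator rest flag cur

def parse_brick_entries_py (volume : String) (all_entries : String) : List (String × List (String × String)) :=
  let xlator := "volume " ++ volume ++ "-cloudsync"
  let cur := pvAloop xlator ((PySem.Str.split? all_entries "\n").getD []) false PySem.Dict.empty
  ((PySem.Dict.empty : PySem.Dict String (PySem.Dict String String)).insert volume cur).items.map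
    (fun p => (p.1, p.2.items))

-- ===== PORT B =====
def parse_brick_entries_py_alt (volume : String) (all_entries : String) : List (String × List (String × String)) :=
  let lines := (PySem.Str.split? all_entries "\n").getD []
  let header := "volume " ++ volume ++ "-cloudsync"
  match PySem.List.index? lines header with
  | none => [(volume, [])]
  | some i =>
    let start := i + 1
    let stop := match PySem.List.index? (lines.drop start) "end-volume" with
      | some j => start + j
      | none => lines.length
    let opts := (PySem.List.slice lines (some (start : Int)) (some (stop : Int))).foldl pvStep PySem.Dict.empty
    [(volume, opts.items)]

-- ===== PRECONDITION & SPEC =====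
-- the block of lines strictly between the first header line and the next literal 'end-volume' line
def pvBlock (volume : String) (all_entries : String) : List String :=
  let lines := (PySem.Str.split? all_entries "\n").getD []
  match PySem.List.index? lines ("volume " ++ volume ++ "-cloudsync") with
  | none => []
  | some i => (lines.drop (i + 1)).takeWhile (fun l => !(l == "end-volume"))

def pvBadLine (line : String) : Bool :=
  let fields := (PySem.Str.split? (PySem.Str.strip line) " ").getD []
  PySem.List.pyGetD fields 0 "" == "option" && fields.length < 3

-- Pre_ excludes exactly the inputs on which Python A raises IndexError: a parsed block line
-- reading 'option' with fewer than three space-separated fields (Python B raises there too).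
def Pre_parse_brick_entries_py (volume : String) (all_entries : String) : Prop :=
  ∀ line ∈ pvBlock volume all_entries, pvBadLine line = false
instance (volume : String) (all_entries : String) : Decidable (Pre_parse_brick_entries_py volume all_entries) := by unfold Pre_parse_brick_entries_py; infer_instance

def pvWitness_parse_brick_entries_py : String × String :=
  ("vol1", "volume vol1-cloudsync\n    option cs-max-mb 4000\n    option cloudsync on\nend-volume")

def Spec_parse_brick_entries_py (volume : String) (all_entries : String) (out : List (String × List (String × String))) : Prop := out = parse_brick_entries_py_alt volume all_entries
instance (volume : String) (all_entries : String) (out : List (String × List (String × String))) : Decidable (Spec_parse_brick_entries_py volume all_entries out) := by unfold Spec_parse_brick_entries_py; infer_instance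

-- ===== CLAIM (what is proved, stated in full; the proofs are below) =====
def Claim_equal_parse_brick_entries_py : Prop := ∀ (volume : String) (all_entries : String), Dom_parse_brick_entries_py volume all_entries → Pre_parse_brick_entries_py volume all_entries → Spec_parse_brick_entries_py volume all_entries (parse_brick_entries_py volume all_entries)

-- ===== LEMMAS AND PROOFS =====

-- dropWhile keeps the last element when it fails the predicate
lemma pv_dropWhile_last {p : Char → Bool} (l : List Char) (a : Char) (ha : p a = false) :
    ∃ t, List.dropWhile p (l ++ [a]) = t ++ [a] := by
  induction l with
  | nil => exact ⟨[], by simp [ha]⟩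
  | cons c cs ih =>
    by_cases hc : p c = true
    · simpa [List.dropWhile, hc] using ih
    · exact ⟨c :: cs, by simp [hc]⟩

-- strip keeps a leading non-space character
lemma pv_strip_cons {c : Char} {cs : List Char} (h : PySem.Chars.isspace c = false) :
    ∃ cs', PySem.Chars.strip (c :: cs) = c :: cs' := by
  unfold PySem.Chars.strip PySem.Chars.lstrip PySem.Chars.rstrip
  rw [List.dropWhile_cons_of_neg (by simp [h])]
  have : (c :: cs).reverse = cs.reverse ++ [c] := by simp
  rw [this]
  obtain ⟨t, ht⟩ := pv_dropWhile_last cs.reverse c h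
  exact ⟨t.reverse, by simp [ht]⟩

-- shape of splitOn.go's result
lemma pv_go_shape (sep : List Char) (fuel : Nat) :
    ∀ (l cur : List Char) (acc : List (List Char)),
      ∃ t rest, PySem.Chars.splitOn.go sep fuel l cur acc = acc.reverse ++ (cur.reverse ++ t) :: rest := by
  induction fuel with
  | zero =>
    intro l cur acc
    exact ⟨l, [], by rw [PySem.Chars.splitOn.go.eq_def]; simp⟩
  | succ n ih =>
    intro l cur acc
    cases l with
    | nil => exact ⟨[], [], by rw [PySem.Chars.splitOn.go.eq_def]; simp⟩
    | cons c rest =>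
      rw [PySem.Chars.splitOn.go.eq_def]
      by_cases hp : sep.isPrefixOf (c :: rest) = true
      · simp only [hp, if_true]
        obtain ⟨t, r, hr⟩ := ih (List.drop sep.length (c :: rest)) [] (cur.reverse :: acc)
        exact ⟨[], t :: r, by simp [hr]⟩
      · simp only [hp]
        obtain ⟨t, r, hr⟩ := ih rest (c :: cur) acc
        exact ⟨c :: t, r, by simpa using hr⟩

-- the first field of a line starting with a non-space character starts with that character
lemma pv_splitOn_head {c : Char} (cs : List Char) (h : c ≠ ' ') :
    ∃ t rest, PySem.Chars.splitOn (c :: cs) [' '] = (c :: t) :: rest := by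
  unfold PySem.Chars.splitOn
  have hlen : (c :: cs).length + 1 = cs.length + 2 := by simp
  rw [hlen]
  rw [PySem.Chars.splitOn.go.eq_def]
  have hp : ([' '] : List Char).isPrefixOf (c :: cs) = false := by
    simp [List.isPrefixOf]
    exact fun he => absurd he.symm h
  simp only [hp, Bool.false_eq_true, if_false]
  obtain ⟨t, r, hr⟩ := pv_go_shape [' '] (cs.length + 1) cs [c] []
  exact ⟨t, r, by simpa using hr⟩

-- the xlator line parses to a no-op: its first field starts with 'v', not 'o'
lemma pv_step_xlator (v : String) (d : PySem.Dict String String) :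
    pvStep d ("volume " ++ v ++ "-cloudsync") = d := by
  unfold pvStep
  have hx : ("volume " ++ v ++ "-cloudsync").toList =
      'v' :: ("olume ".toList ++ (v.toList ++ "-cloudsync".toList)) := by
    have h1 : ("volume " ++ v ++ "-cloudsync").toList =
        "volume ".toList ++ (v.toList ++ "-cloudsync".toList) := by
      simp [String.toList_append]
    have h2 : "volume ".toList = 'v' :: "olume ".toList := by decide
    rw [h1, h2, List.cons_append]
  obtain ⟨cs', hcs'⟩ := pv_strip_cons (c := 'v')
    (cs := "olume ".toList ++ (v.toList ++ "-cloudsync".toList)) (by decide)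
  obtain ⟨t, rest, hsplit⟩ := pv_splitOn_head (c := 'v') cs' (by decide)
  have key : PySem.Chars.splitOn (PySem.Chars.strip (("volume " ++ v ++ "-cloudsync").toList)) [' '] =
      ('v' :: t) :: rest := by
    rw [hx, hcs', hsplit]
  have : (PySem.Str.split? (PySem.Str.strip ("volume " ++ v ++ "-cloudsync")) " ").getD [] =
      String.ofList ('v' :: t) :: rest.map String.ofList := by
    unfold PySem.Str.split? PySem.Chars.split?
    have hsep : (" " : String).toList = [' '] := by decide
    rw [PySem.Str.toList_strip, hsep, key]
    simp
  rw [this]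
  have hne : (String.ofList ('v' :: t) == "option") = false := by
    apply beq_false_of_ne
    intro he
    have : ('v' :: t) = "option".toList := by rw [← he]; simp
    simp at this
  simp [PySem.List.pyGetD, PySem.List.pyGet?, PySem.List.pyIdx?, hne]

-- the xlator line is never the literal 'end-volume'
lemma pv_xlator_ne (v : String) : (("end-volume" : String) == ("volume " ++ v ++ "-cloudsync")) = false := by
  apply beq_false_of_ne
  intro he
  have : ("end-volume" : String).toList = ("volume " ++ v ++ "-cloudsync").toList := by rw [he]
  simp [String.toList_append] at this

-- flag = 0 phase: lines without the xlator are skipped entirely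
lemma pv_Aloop_false_of_not_mem (xl : String) (l : List String) (d : PySem.Dict String String)
    (h : xl ∉ l) : pvAloop xl l false d = d := by
  induction l with
  | nil => rfl
  | cons a rest ih =>
    have ha : (a == xl) = false := beq_false_of_ne (fun he => h (he ▸ List.mem_cons_self))
    simp only [pvAloop, ha]
    exact ih (fun hm => h (List.mem_cons_of_mem _ hm))

lemma pv_Aloop_false_append (xl : String) (pre suf : List String) (d : PySem.Dict String String)
    (h : xl ∉ pre) : pvAloop xl (pre ++ xl :: suf) false d = pvAloop xl suf true d := by
  induction pre with
  | nil => simp [pvAloop]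
  | cons a rest ih =>
    have ha : (a == xl) = false := beq_false_of_ne (fun he => h (he ▸ List.mem_cons_self))
    simp only [List.cons_append, pvAloop, ha]
    exact ih (fun hm => h (List.mem_cons_of_mem _ hm))

-- flag = 1 phase, the block ends with 'end-volume'
lemma pv_Aloop_true_break (v : String) (b c : List String) (d : PySem.Dict String String)
    (hb : ("end-volume" : String) ∉ b) :
    pvAloop ("volume " ++ v ++ "-cloudsync") (b ++ "end-volume" :: c) true d = b.foldl pvStep d := by
  induction b generalizing d with
  | nil => simp [pvAloop, pv_xlator_ne v]
  | cons a rest ih =>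
    by_cases ha : a = ("volume " ++ v ++ "-cloudsync")
    · subst ha
      simp only [List.cons_append, pvAloop, BEq.rfl, if_true, List.foldl_cons,
        pv_step_xlator v d]
      exact ih _ (fun hm => hb (List.mem_cons_of_mem _ hm))
    · have ha' : (a == ("volume " ++ v ++ "-cloudsync")) = false := beq_false_of_ne ha
      have hae : (a == ("end-volume" : String)) = false :=
        beq_false_of_ne (fun he => hb (he ▸ List.mem_cons_self))
      simp only [List.cons_append, pvAloop, ha', hae, Bool.false_eq_true, if_false,
        Bool.true_and, if_true, List.foldl_cons]
      exact ih _ (fun hm => hb (List.mem_cons_of_mem _ hm))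

-- flag = 1 phase, no 'end-volume' until the end of the input
lemma pv_Aloop_true_all (v : String) (b : List String) (d : PySem.Dict String String)
    (hb : ("end-volume" : String) ∉ b) :
    pvAloop ("volume " ++ v ++ "-cloudsync") b true d = b.foldl pvStep d := by
  induction b generalizing d with
  | nil => rfl
  | cons a rest ih =>
    by_cases ha : a = ("volume " ++ v ++ "-cloudsync")
    · subst ha
      simp only [pvAloop, BEq.rfl, if_true, List.foldl_cons, pv_step_xlator v d]
      exact ih _ (fun hm => hb (List.mem_cons_of_mem _ hm))
    · have ha' : (a == ("volume " ++ v ++ "-cloudsync")) = false := beq_false_of_ne ha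
      have hae : (a == ("end-volume" : String)) = false :=
        beq_false_of_ne (fun he => hb (he ▸ List.mem_cons_self))
      simp only [pvAloop, ha', hae, Bool.false_eq_true, if_false, Bool.true_and, if_true,
        List.foldl_cons]
      exact ih _ (fun hm => hb (List.mem_cons_of_mem _ hm))

lemma pv_items_insert_empty (v : String) (d : PySem.Dict String String) :
    ((PySem.Dict.empty : PySem.Dict String (PySem.Dict String String)).insert v d).items.map
      (fun p => (p.1, p.2.items)) = [(v, d.items)] := by
  rfl

-- ===== VERDICT (by name: the statement is the Claim_ definition above) =====
theorem parse_brick_entries_py_spec : Claim_equal_parse_brick_entries_py := by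
  intro volume all_entries _ _
  unfold Spec_parse_brick_entries_py parse_brick_entries_py parse_brick_entries_py_alt
  set lines := (PySem.Str.split? all_entries "\n").getD [] with hlines
  set xl := "volume " ++ volume ++ "-cloudsync" with hxl
  rw [pv_items_insert_empty]
  cases hidx : PySem.List.index? lines xl with
  | none =>
    have hnm : xl ∉ lines := (PySem.List.index?_eq_none_iff _ _).mp hidx
    rw [pv_Aloop_false_of_not_mem xl lines PySem.Dict.empty hnm]
    rw [PySem.List.index?_eq_idxOf?] at hidx
    simp [hidx, PySem.Dict.empty]
  | some i =>
    obtain ⟨pre, suf, hsplit, hlen, hnm⟩ := (PySem.List.index?_eq_some_iff _ _ _).mp hidx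
    have hdrop : lines.drop (i + 1) = suf := by
      rw [hsplit, ← hlen]
      simp
    have hL : lines.length = pre.length + suf.length + 1 := by
      rw [hsplit]; simp; omega
    have hA0 : pvAloop xl lines false PySem.Dict.empty = pvAloop xl suf true PySem.Dict.empty := by
      rw [hsplit]; exact pv_Aloop_false_append xl pre suf _ hnm
    rw [PySem.List.index?_eq_idxOf?] at hidx
    cases hidx2 : PySem.List.index? (lines.drop (i + 1)) ("end-volume" : String) with
    | none =>
      have hnm2 : ("end-volume" : String) ∉ suf := by
        rw [← hdrop]; exact (PySem.List.index?_eq_none_iff _ _).mp hidx2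
      have hslice : PySem.List.slice lines (some ((i : Int) + 1)) (some ((lines.length : Nat) : Int)) =
          suf := by
        have hcast : ((i : Int) + 1) = (((i + 1 : Nat) : Int)) := by push_cast; ring
        rw [hcast, PySem.List.slice_natCast, hdrop]
        apply List.take_of_length_le
        omega
      rw [PySem.List.index?_eq_idxOf?] at hidx2
      rw [hA0, pv_Aloop_true_all volume suf _ hnm2]
      simp [hidx, hidx2, hslice]
    | some j =>
      obtain ⟨b, c, hsplit2, hlen2, hnm2⟩ := (PySem.List.index?_eq_some_iff _ _ _).mp hidx2
      have hsuf : suf = b ++ "end-volume" :: c := by rw [← hdrop, hsplit2]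
      have hslice : PySem.List.slice lines (some ((i : Int) + 1)) (some ((i : Int) + 1 + (j : Int))) = b := by
        have hcast1 : ((i : Int) + 1) = (((i + 1 : Nat) : Int)) := by push_cast; ring
        rw [hcast1, PySem.List.slice_natCast_add, hdrop, hsuf, ← hlen2]
        simp
      rw [PySem.List.index?_eq_idxOf?] at hidx2
      rw [hA0, hsuf, pv_Aloop_true_break volume b c _ hnm2]
      simp [hidx, hidx2, hslice]
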